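-- pv_equiv track=rewrite | github.com/Jaato-framework-and-examples/jaato | jaato-server/shared/plugins/diff_formatter/word_diff.py | _tokenize_with_whitespace
-- ===== SOURCE A (Python) =====
-- from typing import List, Tuple
--
-- def _tokenize_with_whitespace(text: str) -> List[str]:
--     """Split text into words while preserving whitespace as separate tokens.
--
--     Example: "hello  world" -> ["hello", "  ", "world"]
--     """
--     tokens = []
--     current = []
--     in_whitespace = False
--
--     for char in text:
--         is_ws = char.isspace()
--         if is_ws != in_whitespace:
--             if current:
--                 tokens.append("".join(current))
--                 current = []
--             in_whitespace = is_ws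
--         current.append(char)
--
--     if current:
--         tokens.append("".join(current))
--
--     return tokens
-- ===== SOURCE B (Python) =====
-- from typing import List
--
--
-- def _tokenize_with_whitespace(text: str) -> List[str]:
--     """Split text into words while preserving whitespace as separate tokens.
--
--     Two staged passes: first compute the cut positions (the indices where the
--     isspace-ness of adjacent characters changes), then slice the text between
--     consecutive cut positions.
--     """
--     if not text:
--         return []
--     n = len(text)
--     cuts = [0] + [i for i in range(1, n)
--                   if text[i].isspace() != text[i - 1].isspace()] + [n]
--     return [text[a:b] for a, b in zip(cuts, cuts[1:])]
-- ===== Notes on version B (the rewrite author's own statement) =====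
-- stated objective: alternative
-- what changed: Replaced the single-pass state machine (tokens/current buffer/in_whitespace flag) with two staged passes: first compute the list of cut indices where the isspace-ness of adjacent characters changes, then slice the text between consecutive cut indices.
import Mathlib
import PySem

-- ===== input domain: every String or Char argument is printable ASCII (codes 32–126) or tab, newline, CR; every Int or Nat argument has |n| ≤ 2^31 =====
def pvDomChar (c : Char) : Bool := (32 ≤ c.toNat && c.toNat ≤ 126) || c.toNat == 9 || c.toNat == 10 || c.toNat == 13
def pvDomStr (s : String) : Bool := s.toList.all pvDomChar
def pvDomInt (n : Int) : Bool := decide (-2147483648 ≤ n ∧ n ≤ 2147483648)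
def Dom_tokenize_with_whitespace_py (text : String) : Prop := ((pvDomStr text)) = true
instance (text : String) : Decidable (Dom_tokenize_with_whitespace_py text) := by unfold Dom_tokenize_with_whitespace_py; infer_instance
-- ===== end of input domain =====

-- B replaces A's single-pass state machine (token buffer + in_whitespace flag) by two staged
-- passes: compute the cut indices where adjacent characters' isspace-ness changes, then slice
-- the text between consecutive cuts; alternative decomposition, same cost.

-- ===== PORT A =====
-- one loop step of A: state = (tokens, current, in_whitespace)
def pvStepA (st : List String × List Char × Bool) (ch : Char) : List String × List Char × Bool :=
  let is_ws := PySem.Chars.isspace ch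
  let st1 :=
    if is_ws ≠ st.2.2 then
      ((if st.2.1 ≠ [] then st.1 ++ [String.ofList st.2.1] else st.1), ([] : List Char), is_ws)
    else st
  (st1.1, st1.2.1 ++ [ch], st1.2.2)

def tokenize_with_whitespace_py (text : String) : List String :=
  let st := text.toList.foldl pvStepA ([], [], false)
  if st.2.1 ≠ [] then st.1 ++ [String.ofList st.2.1] else st.1

-- ===== PORT B =====
-- cuts = [0] + [i for i in range(1, n) if text[i].isspace() != text[i-1].isspace()] + [n]
-- (text[i] indexing is in range here, so getD is exact)
def pvCutsB (cs : List Char) : List Nat :=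
  ([0] ++ (List.range' 1 (cs.length - 1)).filter
      (fun i => PySem.Chars.isspace (cs.getD i ' ') != PySem.Chars.isspace (cs.getD (i - 1) ' '))) ++ [cs.length]

-- text[a:b] with 0 ≤ a ≤ b ≤ len(text) is exactly (drop a).take (b - a)
def tokenize_with_whitespace_py_alt (text : String) : List String :=
  let cs := text.toList
  if cs.isEmpty then []
  else
    let cuts := pvCutsB cs
    (cuts.zip cuts.tail).map (fun p => String.ofList ((cs.drop p.1).take (p.2 - p.1)))

-- ===== PRECONDITION & SPEC =====
def Spec_tokenize_with_whitespace_py (text : String) (out : List String) : Prop := out = tokenize_with_whitespace_py_alt text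
instance (text : String) (out : List String) : Decidable (Spec_tokenize_with_whitespace_py text out) := by unfold Spec_tokenize_with_whitespace_py; infer_instance

-- ===== CLAIM (what is proved, stated in full; the proofs are below) =====
def Claim_equal_tokenize_with_whitespace_py : Prop := ∀ (text : String), Dom_tokenize_with_whitespace_py text → Spec_tokenize_with_whitespace_py text (tokenize_with_whitespace_py text)

-- ===== LEMMAS AND PROOFS =====

-- reference: maximal runs of consecutive characters with equal isspace key
def pvGroupBy : List Char → List (List Char)
  | [] => []
  | c :: rest =>
      (c :: rest.takeWhile (fun d => PySem.Chars.isspace d == PySem.Chars.isspace c)) ::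
      pvGroupBy (rest.dropWhile (fun d => PySem.Chars.isspace d == PySem.Chars.isspace c))
termination_by cs => cs.length
decreasing_by
  exact Nat.lt_succ_of_le (List.length_dropWhile_le _ _)

-- ---- A's side: A = map ofList (pvGroupBy cs) ----

lemma pvMainA (cs : List Char) : ∀ (tokens : List String) (cur : List Char) (k : Bool),
    cur ≠ [] →
    (let st := cs.foldl pvStepA (tokens, cur, k)
     if st.2.1 ≠ [] then st.1 ++ [String.ofList st.2.1] else st.1)
    = tokens ++ ((cur ++ cs.takeWhile (fun d => PySem.Chars.isspace d == k)) ::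
        pvGroupBy (cs.dropWhile (fun d => PySem.Chars.isspace d == k))).map String.ofList := by
  induction cs with
  | nil =>
      intro tokens cur k hcur
      simp [pvGroupBy, hcur]
  | cons c cs ih =>
      intro tokens cur k hcur
      by_cases hk : PySem.Chars.isspace c = k
      · have hstep : pvStepA (tokens, cur, k) c = (tokens, cur ++ [c], k) := by
          simp [pvStepA, hk]
        simp only [List.foldl_cons, hstep]
        have := ih tokens (cur ++ [c]) k (by simp)
        simp only [List.takeWhile, List.dropWhile, hk, beq_self_eq_true]
        simpa [List.append_assoc] using this
      · have hstep : pvStepA (tokens, cur, k) c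
            = (tokens ++ [String.ofList cur], [c], PySem.Chars.isspace c) := by
          simp [pvStepA, hk, hcur]
        simp only [List.foldl_cons, hstep]
        have := ih (tokens ++ [String.ofList cur]) [c] (PySem.Chars.isspace c) (by simp)
        have hbeq : (PySem.Chars.isspace c == k) = false := by simp [hk]
        simp only [List.takeWhile, List.dropWhile, hbeq]
        rw [pvGroupBy]
        simpa [List.append_assoc] using this

lemma pvFirstStep (c : Char) :
    pvStepA ([], [], false) c = ([], [c], PySem.Chars.isspace c) := by
  by_cases h : PySem.Chars.isspace c = false <;> simp [pvStepA, h]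

lemma pvA_eq_groups (text : String) :
    tokenize_with_whitespace_py text = (pvGroupBy text.toList).map String.ofList := by
  unfold tokenize_with_whitespace_py
  cases hcs : text.toList with
  | nil => simp [pvGroupBy]
  | cons c cs =>
      simp only [List.foldl_cons, pvFirstStep]
      have := pvMainA cs [] [c] (PySem.Chars.isspace c) (by simp)
      rw [pvGroupBy]
      simpa using this

-- ---- B's side: slices between cuts = pvGroupBy cs ----

-- slices of cs between consecutive entries of cuts
def pvSlices (cs : List Char) (cuts : List Nat) : List (List Char) :=
  (cuts.zip cuts.tail).map (fun p => (cs.drop p.1).take (p.2 - p.1))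

-- the boundary indices (middle part of pvCutsB)
def pvBounds (cs : List Char) : List Nat :=
  (List.range' 1 (cs.length - 1)).filter
    (fun i => PySem.Chars.isspace (cs.getD i ' ') != PySem.Chars.isspace (cs.getD (i - 1) ' '))

lemma pvSlices_single (cs : List Char) (a : Nat) : pvSlices cs [a] = [] := rfl
lemma pvSlices_cons_cons (cs : List Char) (a b : Nat) (t : List Nat) :
    pvSlices cs (a :: b :: t) = (cs.drop a).take (b - a) :: pvSlices cs (b :: t) := rfl

lemma pvSlices_shift (g rest : List Char) (cuts : List Nat) :
    pvSlices (g ++ rest) (cuts.map (· + g.length)) = pvSlices rest cuts := by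
  induction cuts with
  | nil => rfl
  | cons a t ih =>
      cases t with
      | nil => rfl
      | cons b t' =>
          simp only [List.map_cons] at ih ⊢
          rw [pvSlices_cons_cons, pvSlices_cons_cons, ih]
          congr 1
          have hdrop : (g ++ rest).drop (a + g.length) = rest.drop a := by
            rw [Nat.add_comm, List.drop_append, List.drop_eq_nil_of_le (Nat.le_add_right _ _),
              Nat.add_sub_cancel_left, List.nil_append]
          rw [hdrop]
          congr 1
          omega

lemma pvAllKeys (g : List Char) (k : Bool) (hall : ∀ c ∈ g, PySem.Chars.isspace c = k)
    (j : Nat) (hj : j < g.length) : PySem.Chars.isspace (g.getD j ' ') = k := by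
  rw [List.getD_eq_getElem _ _ hj]
  exact hall _ (List.getElem_mem hj)

lemma pvBounds_decomp (g rest : List Char) (k : Bool) (hg : g ≠ [])
    (hall : ∀ c ∈ g, PySem.Chars.isspace c = k)
    (hrest : ∀ c ∈ rest.head?, PySem.Chars.isspace c ≠ k) :
    pvBounds (g ++ rest)
      = if rest = [] then [] else g.length :: (pvBounds rest).map (· + g.length) := by
  have hgl : 1 ≤ g.length := by
    cases g with | nil => exact absurd rfl hg | cons _ _ => simp
  unfold pvBounds
  have hlen : (g ++ rest).length - 1 = (g.length - 1) + rest.length := by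
    simp only [List.length_append]
    omega
  have hsplit : List.range' 1 ((g ++ rest).length - 1)
      = List.range' 1 (g.length - 1) ++ List.range' g.length rest.length := by
    rw [hlen, ← List.range'_append_1, show 1 + (g.length - 1) = g.length from by omega]
  rw [hsplit, List.filter_append]
  -- indices inside g are never boundaries
  have h1 : (List.range' 1 (g.length - 1)).filter
      (fun i => PySem.Chars.isspace ((g ++ rest).getD i ' ')
        != PySem.Chars.isspace ((g ++ rest).getD (i - 1) ' ')) = [] := by
    rw [List.filter_eq_nil_iff]
    intro i hi
    have hmem := List.mem_range'_1.mp hi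
    have hi1 : i < g.length := by omega
    have hi2 : i - 1 < g.length := by omega
    have e1 : (g ++ rest).getD i ' ' = g.getD i ' ' := List.getD_append _ _ _ _ hi1
    have e2 : (g ++ rest).getD (i - 1) ' ' = g.getD (i - 1) ' ' := List.getD_append _ _ _ _ hi2
    simp only [e1, e2, pvAllKeys g k hall i hi1, pvAllKeys g k hall (i - 1) hi2]
    simp
  rw [h1, List.nil_append]
  cases rest with
  | nil => simp
  | cons r rs =>
      have hrk : PySem.Chars.isspace r ≠ k := hrest r (by simp)
      simp only [if_neg (by simp : (r :: rs : List Char) ≠ [])]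
      -- range' g.length (rs.length+1) = g.length :: range' (g.length+1) rs.length
      rw [(by simp : (r :: rs : List Char).length = rs.length + 1), List.range'_succ,
        List.filter_cons]
      have hb : (PySem.Chars.isspace ((g ++ r :: rs).getD g.length ' ')
          != PySem.Chars.isspace ((g ++ r :: rs).getD (g.length - 1) ' ')) = true := by
        have e1 : (g ++ r :: rs).getD g.length ' ' = r := by
          rw [List.getD_append_right _ _ _ _ (le_refl _)]
          simp
        have e2 : (g ++ r :: rs).getD (g.length - 1) ' ' = g.getD (g.length - 1) ' ' :=
          List.getD_append _ _ _ _ (by omega)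
        rw [e1, e2, pvAllKeys g k hall _ (by omega)]
        simpa using hrk
      rw [if_pos hb]
      congr 1
      -- remaining indices: shifted boundaries of rest
      have hmap : List.range' (g.length + 1) rs.length
          = (List.range' 1 rs.length).map (· + g.length) := by
        rw [List.range'_eq_map_range, List.range'_eq_map_range, List.map_map]
        apply List.map_congr_left
        intro x _
        simp; omega
      rw [hmap, List.filter_map]
      congr 1
      apply List.filter_congr
      intro j hj
      have hj1 := List.mem_range'_1.mp hj
      have e1 : (g ++ r :: rs).getD (j + g.length) ' ' = (r :: rs).getD j ' ' := by
        rw [List.getD_append_right _ _ _ _ (by omega)]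
        congr 1; omega
      have e2 : (g ++ r :: rs).getD (j + g.length - 1) ' ' = (r :: rs).getD (j - 1) ' ' := by
        rw [List.getD_append_right _ _ _ _ (by omega)]
        congr 1; omega
      simp only [Function.comp, e1, e2]
  
-- head of dropWhile fails the predicate
lemma pvDropWhile_head {p : Char → Bool} :
    ∀ (l : List Char) (c : Char), c ∈ (l.dropWhile p).head? → p c = false := by
  intro l
  induction l with
  | nil => intro c hc; simp [List.dropWhile] at hc
  | cons a t ih =>
      intro c hc
      by_cases ha : p a
      · rw [List.dropWhile_cons_of_pos ha] at hc
        exact ih c hc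
      · rw [List.dropWhile_cons_of_neg ha] at hc
        simp at hc
        subst hc
        simpa using ha

lemma pvCutsB_eq (cs : List Char) : pvCutsB cs = 0 :: (pvBounds cs ++ [cs.length]) := by
  simp [pvCutsB, pvBounds]

lemma pvMainB_aux : ∀ (n : Nat) (cs : List Char), cs.length ≤ n → cs ≠ [] →
    pvSlices cs (pvCutsB cs) = pvGroupBy cs := by
  intro n
  induction n with
  | zero =>
      intro cs hlen hne
      cases cs with
      | nil => exact absurd rfl hne
      | cons c t => simp at hlen
  | succ n ih =>
      intro cs hlen hne
      cases cs with
      | nil => exact absurd rfl hne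
      | cons c t =>
        have hcs : c :: t = (c :: t.takeWhile (fun d => PySem.Chars.isspace d == PySem.Chars.isspace c))
            ++ t.dropWhile (fun d => PySem.Chars.isspace d == PySem.Chars.isspace c) := by
          simp [List.takeWhile_append_dropWhile]
        have hall : ∀ d ∈ (c :: t.takeWhile (fun d => PySem.Chars.isspace d == PySem.Chars.isspace c)),
            PySem.Chars.isspace d = PySem.Chars.isspace c := by
          intro d hd
          rcases List.mem_cons.mp hd with rfl | hd
          · rfl
          · simpa using List.mem_takeWhile_imp hd
        have hrest : ∀ d ∈ (t.dropWhile (fun d => PySem.Chars.isspace d == PySem.Chars.isspace c)).head?,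
            PySem.Chars.isspace d ≠ PySem.Chars.isspace c := by
          intro d hd
          simpa using pvDropWhile_head t d hd
        have hbd := pvBounds_decomp _ _ _ (by simp) hall hrest
        by_cases hr : t.dropWhile (fun d => PySem.Chars.isspace d == PySem.Chars.isspace c) = []
        · -- a single run: cuts = [0, length], one slice = the whole string
          have hg : c :: t.takeWhile (fun d => PySem.Chars.isspace d == PySem.Chars.isspace c) = c :: t := by
            conv_rhs => rw [hcs]
            simp [hr]
          have hb0 : pvBounds (c :: t) = [] := by
            conv_lhs => rw [hcs]
            rw [hbd, if_pos hr]
          rw [pvCutsB_eq, hb0, List.nil_append, pvSlices_cons_cons, pvSlices_single]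
          rw [pvGroupBy, hr, pvGroupBy, hg]
          simp
        · -- at least two runs: first cut at the first run's length, the rest shifted
          have hb1 : pvBounds (c :: t)
              = (c :: t.takeWhile (fun d => PySem.Chars.isspace d == PySem.Chars.isspace c)).length
                :: (pvBounds (t.dropWhile (fun d => PySem.Chars.isspace d == PySem.Chars.isspace c))).map
                  (· + (c :: t.takeWhile (fun d => PySem.Chars.isspace d == PySem.Chars.isspace c)).length) := by
            conv_lhs => rw [hcs]
            rw [hbd, if_neg hr]
          have hlen2 : (c :: t).length
              = (c :: t.takeWhile (fun d => PySem.Chars.isspace d == PySem.Chars.isspace c)).length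
                + (t.dropWhile (fun d => PySem.Chars.isspace d == PySem.Chars.isspace c)).length := by
            conv_lhs => rw [hcs]
            rw [List.length_append]
          have e1 : pvCutsB (c :: t)
              = 0 :: (pvCutsB (t.dropWhile (fun d => PySem.Chars.isspace d == PySem.Chars.isspace c))).map
                  (· + (c :: t.takeWhile (fun d => PySem.Chars.isspace d == PySem.Chars.isspace c)).length) := by
            rw [pvCutsB_eq, pvCutsB_eq, hb1, hlen2]
            simp [Nat.add_comm]
          rw [e1, pvCutsB_eq]
          simp only [List.map_cons, Nat.zero_add]
          rw [pvSlices_cons_cons]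
          rw [pvGroupBy]
          congr 1
          · -- the first slice is the first run
            rw [List.drop_zero, Nat.sub_zero]
            conv_lhs => rw [hcs]
            exact List.take_left ..
          · -- the remaining slices are the groups of the rest
            have e2 : ((c :: t.takeWhile (fun d => PySem.Chars.isspace d == PySem.Chars.isspace c)).length
                :: (pvBounds (t.dropWhile (fun d => PySem.Chars.isspace d == PySem.Chars.isspace c))
                  ++ [(t.dropWhile (fun d => PySem.Chars.isspace d == PySem.Chars.isspace c)).length]).map
                  (· + (c :: t.takeWhile (fun d => PySem.Chars.isspace d == PySem.Chars.isspace c)).length))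
                = (pvCutsB (t.dropWhile (fun d => PySem.Chars.isspace d == PySem.Chars.isspace c))).map
                  (· + (c :: t.takeWhile (fun d => PySem.Chars.isspace d == PySem.Chars.isspace c)).length) := by
              rw [pvCutsB_eq]
              simp
            rw [e2]
            conv_lhs => rw [hcs]
            rw [pvSlices_shift]
            exact ih _ (le_trans (List.length_dropWhile_le _ _) (by simpa using hlen)) hr

lemma pvMainB (cs : List Char) (h : cs ≠ []) : pvSlices cs (pvCutsB cs) = pvGroupBy cs :=
  pvMainB_aux cs.length cs (le_refl _) h

-- final bridging
lemma pvB_eq_groups (text : String) :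
    tokenize_with_whitespace_py_alt text = (pvGroupBy text.toList).map String.ofList := by
  unfold tokenize_with_whitespace_py_alt
  by_cases h : text.toList = []
  · simp [h, pvGroupBy]
  · rw [if_neg (by simpa [List.isEmpty_iff] using h)]
    have := pvMainB text.toList h
    calc ((pvCutsB text.toList).zip (pvCutsB text.toList).tail).map
          (fun p => String.ofList ((text.toList.drop p.1).take (p.2 - p.1)))
        = (pvSlices text.toList (pvCutsB text.toList)).map String.ofList := by
          unfold pvSlices; rw [List.map_map]; rfl
      _ = (pvGroupBy text.toList).map String.ofList := by rw [this]

-- ===== VERDICT (by name: the statement is the Claim_ definition above) =====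
theorem tokenize_with_whitespace_py_spec : Claim_equal_tokenize_with_whitespace_py := by
  intro text _
  unfold Spec_tokenize_with_whitespace_py
  rw [pvA_eq_groups, pvB_eq_groups]
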